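-- pv_equiv track=rewrite | github.com/HCIS-Lab/Affordance-Guided-Self-Consistent-MLLM | src/affordance/ours/agent.py | dumbwaiter_opened
-- ===== SOURCE A (Python) =====
-- def dumbwaiter_opened(action_seq):
--     """assume the dumbwaiter is closed at the beginning"""
--     opened = False
--     for action in action_seq:
--         if action == 'open_dumbwaiter':
--             opened = True
--         elif action == 'close_dumbwaiter':
--             opened = False
--     return opened
-- ===== SOURCE B (Python) =====
-- def dumbwaiter_opened(action_seq):
--     """assume the dumbwaiter is closed at the beginning"""
--     for action in reversed(action_seq):
--         if action == 'open_dumbwaiter':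
--             return True
--         if action == 'close_dumbwaiter':
--             return False
--     return False
-- ===== Notes on version B (the rewrite author's own statement) =====
-- stated objective: alternative
-- what changed: Replaces the forward boolean fold over the whole sequence with a backward early-exit scan that returns on the first decisive action from the end.
import Mathlib
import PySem

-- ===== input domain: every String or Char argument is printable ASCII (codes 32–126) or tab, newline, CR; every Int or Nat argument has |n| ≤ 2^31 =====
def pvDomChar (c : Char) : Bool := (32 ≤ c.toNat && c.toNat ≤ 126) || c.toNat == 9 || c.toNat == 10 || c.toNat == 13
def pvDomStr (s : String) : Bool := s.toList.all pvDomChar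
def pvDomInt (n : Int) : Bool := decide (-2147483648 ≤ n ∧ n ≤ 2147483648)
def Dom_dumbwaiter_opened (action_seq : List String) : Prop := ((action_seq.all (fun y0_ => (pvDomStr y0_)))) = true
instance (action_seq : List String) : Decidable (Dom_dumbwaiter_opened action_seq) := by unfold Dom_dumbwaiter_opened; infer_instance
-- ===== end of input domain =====

-- B replaces A's forward boolean fold with a backward early-exit scan (alternative decomposition, same cost).

-- ===== PORT A =====
def dumbwaiter_opened (action_seq : List String) : Bool :=
  action_seq.foldl
    (fun opened action =>
      if action = "open_dumbwaiter" then true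
      else if action = "close_dumbwaiter" then false
      else opened)
    false

-- ===== PORT B =====
-- backward scan: first decisive action from the end wins
def dwAltGo : List String → Bool
  | [] => false
  | action :: rest =>
      if action = "open_dumbwaiter" then true
      else if action = "close_dumbwaiter" then false
      else dwAltGo rest

def dumbwaiter_opened_alt (action_seq : List String) : Bool :=
  dwAltGo action_seq.reverse

-- ===== PRECONDITION & SPEC =====
def Spec_dumbwaiter_opened (action_seq : List String) (out : Bool) : Prop := out = dumbwaiter_opened_alt action_seq
instance (action_seq : List String) (out : Bool) : Decidable (Spec_dumbwaiter_opened action_seq out) := by unfold Spec_dumbwaiter_opened; infer_instance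

-- ===== CLAIM (what is proved, stated in full; the proofs are below) =====
def Claim_equal_dumbwaiter_opened : Prop := ∀ (action_seq : List String), Dom_dumbwaiter_opened action_seq → Spec_dumbwaiter_opened action_seq (dumbwaiter_opened action_seq)

-- ===== LEMMAS AND PROOFS =====

-- backward scan with an explicit default, used only for the proof
def dwAltGoD (acc : Bool) : List String → Bool
  | [] => acc
  | action :: rest =>
      if action = "open_dumbwaiter" then true
      else if action = "close_dumbwaiter" then false
      else dwAltGoD acc rest

lemma dwAltGoD_false (xs : List String) : dwAltGoD false xs = dwAltGo xs := by
  induction xs with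
  | nil => rfl
  | cons a rest ih => simp [dwAltGoD, dwAltGo, ih]

lemma dwAltGoD_append_singleton (ys : List String) (x : String) (acc : Bool) :
    dwAltGoD acc (ys ++ [x]) =
      dwAltGoD (if x = "open_dumbwaiter" then true
                else if x = "close_dumbwaiter" then false else acc) ys := by
  induction ys with
  | nil =>
      simp only [List.nil_append, dwAltGoD]
  | cons a rest ih =>
      simp only [List.cons_append, dwAltGoD, ih]

lemma foldl_eq_goD (xs : List String) (acc : Bool) :
    xs.foldl
      (fun opened action =>
        if action = "open_dumbwaiter" then true
        else if action = "close_dumbwaiter" then false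
        else opened) acc = dwAltGoD acc xs.reverse := by
  induction xs generalizing acc with
  | nil => rfl
  | cons a rest ih =>
      simp only [List.foldl_cons, List.reverse_cons, ih,
        dwAltGoD_append_singleton]

-- ===== VERDICT (by name: the statement is the Claim_ definition above) =====
theorem dumbwaiter_opened_spec : Claim_equal_dumbwaiter_opened := by
  intro xs _
  unfold Spec_dumbwaiter_opened dumbwaiter_opened dumbwaiter_opened_alt
  rw [foldl_eq_goD, dwAltGoD_false]
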